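-- pv_equiv track=rewrite | github.com/nattigy/competitive_programming | bootcamp 2021 fall/contest-11 - yishak/D. Red and Blue.py | redAndBlue
-- ===== SOURCE A (Python) =====
-- def redAndBlue(red, blue):
--     big = [0, 0]
--     for i, array in enumerate([red, blue]):
--         summ = 0
--         for j in array:
--             summ += j
--             big[i] = max(big[i], summ)
--     return sum(big)
-- ===== SOURCE B (Python) =====
-- def redAndBlue(red, blue):
--     # Backward recurrence: the max (0-clamped) prefix sum satisfies
--     # best(x::rest) = max(0, x + best(rest)), so fold each array from the back.
--     # No running prefix sum or running max of sums is ever formed.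
--     def best(arr):
--         m = 0
--         for x in reversed(arr):
--             m = max(0, x + m)
--         return m
--     return best(red) + best(blue)
-- ===== Notes on version B (the rewrite author's own statement) =====
-- stated objective: alternative
-- what changed: Replaces A's forward fused loop (running prefix sum plus running max kept in a mutated two-slot list) by a back-to-front fold using the recurrence best(x::rest)=max(0,x+best(rest)); no prefix sums or running maxima are computed.
import Mathlib
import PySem

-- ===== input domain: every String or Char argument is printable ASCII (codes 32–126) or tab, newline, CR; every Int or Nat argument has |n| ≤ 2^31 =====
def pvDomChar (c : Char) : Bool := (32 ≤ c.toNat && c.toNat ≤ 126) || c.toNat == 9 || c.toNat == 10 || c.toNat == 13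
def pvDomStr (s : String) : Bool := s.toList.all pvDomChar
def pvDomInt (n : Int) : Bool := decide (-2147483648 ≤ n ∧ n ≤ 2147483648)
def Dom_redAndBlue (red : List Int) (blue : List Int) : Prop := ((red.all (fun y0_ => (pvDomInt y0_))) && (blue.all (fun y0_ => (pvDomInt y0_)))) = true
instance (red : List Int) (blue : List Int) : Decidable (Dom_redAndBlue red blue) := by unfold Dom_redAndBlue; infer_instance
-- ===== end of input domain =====

-- B replaces A's forward fused loop (running prefix sum + running max in a mutated two-slot list)
-- by a back-to-front fold with the recurrence m ← max(0, x + m); same cost (objective: alternative).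

-- ===== PORT A =====
-- big[i] indexing: enumerate yields i = 0, 1 only, so i.toNat is exact here.
def redAndBlue (red : List Int) (blue : List Int) : Int :=
  let big : List Int := [0, 0]
  let big := (PySem.List.enumerate [red, blue] 0).foldl
    (fun big (p : Int × List Int) =>
      let i := p.1
      let array := p.2
      (array.foldl
        (fun (st : List Int × Int) j =>
          let summ := st.2 + j
          (st.1.set i.toNat (max (st.1.getD i.toNat 0) summ), summ))
        (big, 0)).1)
    big
  big.foldl (· + ·) 0

-- ===== PORT B =====
-- reversed(arr) with accumulator m and m = max(0, x + m): a foldl over arr.reverse.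
def pvBest (arr : List Int) : Int :=
  arr.reverse.foldl (fun m x => max 0 (x + m)) 0

def redAndBlue_alt (red : List Int) (blue : List Int) : Int :=
  pvBest red + pvBest blue

-- ===== PRECONDITION & SPEC =====
def Spec_redAndBlue (red : List Int) (blue : List Int) (out : Int) : Prop := out = redAndBlue_alt red blue
instance (red : List Int) (blue : List Int) (out : Int) : Decidable (Spec_redAndBlue red blue out) := by unfold Spec_redAndBlue; infer_instance

-- ===== CLAIM (what is proved, stated in full; the proofs are below) =====
def Claim_equal_redAndBlue : Prop := ∀ (red : List Int) (blue : List Int), Dom_redAndBlue red blue → Spec_redAndBlue red blue (redAndBlue red blue)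

-- ===== LEMMAS AND PROOFS =====

-- running max over the running prefix sum: A's inner-loop shape
def pvG (m s : Int) : List Int → Int
  | [] => m
  | x :: t => pvG (max m (s + x)) (s + x) t

-- the backward recurrence (B's fold written as a right recursion)
def pvF : List Int → Int
  | [] => 0
  | x :: t => max 0 (x + pvF t)

lemma pvF_nonneg (arr : List Int) : 0 ≤ pvF arr := by
  cases arr with
  | nil => simp [pvF]
  | cons x t => simp [pvF]

lemma pvBest_eq_pvF (arr : List Int) : pvBest arr = pvF arr := by
  unfold pvBest
  rw [List.foldl_reverse]
  induction arr with
  | nil => rfl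
  | cons x t ih => simp [pvF, ← ih]

lemma pvG_eq_pvF (arr : List Int) : ∀ m s : Int, s ≤ m → pvG m s arr = max m (s + pvF arr) := by
  induction arr with
  | nil =>
    intro m s h
    simp [pvG, pvF]
    omega
  | cons x t ih =>
    intro m s h
    simp only [pvG, pvF]
    rw [ih _ _ (le_max_right m (s + x))]
    have := pvF_nonneg t
    rcases max_cases 0 (x + pvF t) with ⟨h1, _⟩ | ⟨h1, _⟩ <;> rw [h1] <;> omega

lemma innerA (i : Nat) (arr : List Int) : ∀ (big : List Int) (s : Int), i < big.length →
    arr.foldl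
      (fun (st : List Int × Int) j =>
        let summ := st.2 + j
        (st.1.set i (max (st.1.getD i 0) summ), summ))
      (big, s)
    = (big.set i (pvG (big.getD i 0) s arr), s + arr.sum) := by
  induction arr with
  | nil =>
    intro big s h
    simp [pvG, List.getD_eq_getElem?_getD, List.getElem?_eq_getElem h, List.set_getElem_self]
  | cons x t ih =>
    intro big s h
    simp only [List.foldl_cons]
    rw [ih _ _ (by simpa using h)]
    simp [pvG, List.getD_eq_getElem?_getD, List.getElem?_set_self (by omega), List.set_set]
    ring_nf

-- ===== VERDICT (by name: the statement is the Claim_ definition above) =====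
theorem redAndBlue_spec : Claim_equal_redAndBlue := by
  intro red blue _
  show redAndBlue red blue = redAndBlue_alt red blue
  unfold redAndBlue redAndBlue_alt
  simp only [PySem.List.enumerate_cons, PySem.List.enumerate_nil, List.foldl_cons, List.foldl_nil,
    show Int.toNat 0 = 0 from rfl, show ((0 : Int) + 1).toNat = 1 from rfl]
  rw [innerA 0 red [0, 0] 0 (by simp)]
  rw [innerA 1 blue _ 0 (by simp)]
  simp [pvBest_eq_pvF, pvG_eq_pvF _ 0 0 le_rfl, List.getD, pvF_nonneg]
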